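-- pv_equiv track=rewrite | github.com/qwas15788hj/-Algorithm | 프로그래머스/120956. 옹알이(1).py | solution
-- ===== SOURCE A (Python) =====
-- from itertools import permutations
--
-- def solution(babbling):
--     answer = 0
--
--     arr = ["aya", "ye", "woo", "ma"]
--     word_perm = []
--     for i in range(2, 5):
--         perm = list(permutations(arr, i))
--         for p in perm:
--             word_perm.append(p)
--
--     for words in word_perm:
--         w = ""
--         for word in words:
--             w += word
--         arr.append(w)
--
--     for bab in babbling:
--         if bab in arr:
--             answer += 1
--
--     return answer
-- ===== SOURCE B (Python) =====
-- def solution(babbling):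
--     frags = ["aya", "ye", "woo", "ma"]
--
--     def ok(s, used):
--         if s == "":
--             return used != 0
--         for i, f in enumerate(frags):
--             if not (used >> i) & 1 and s.startswith(f):
--                 if ok(s[len(f):], used | (1 << i)):
--                     return True
--         return False
--
--     return sum(1 for bab in babbling if ok(bab, 0))
-- ===== Notes on version B (the rewrite author's own statement) =====
-- stated objective: alternative
-- what changed: Instead of precomputing the 64-entry table of all concatenations of 2..4-permutations of the fragments and testing list membership, B parses each babbling word by backtracking prefix-matching over the four fragments with a used-bitmask, counting words that reduce to the empty string after consuming at least one fragment.
import Mathlib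
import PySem

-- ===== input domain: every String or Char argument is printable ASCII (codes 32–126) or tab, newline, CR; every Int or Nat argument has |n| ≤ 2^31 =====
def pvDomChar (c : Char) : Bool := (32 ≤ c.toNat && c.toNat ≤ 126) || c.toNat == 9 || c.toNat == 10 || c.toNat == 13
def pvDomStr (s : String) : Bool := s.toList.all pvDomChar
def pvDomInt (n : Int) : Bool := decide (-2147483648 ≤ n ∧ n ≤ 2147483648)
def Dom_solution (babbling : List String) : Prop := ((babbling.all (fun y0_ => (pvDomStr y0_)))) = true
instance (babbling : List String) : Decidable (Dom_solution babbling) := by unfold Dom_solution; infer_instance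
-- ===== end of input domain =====

-- B replaces A's precomputed table of all 2..4-fragment permutation concatenations by a
-- per-word backtracking parser over the four fragments (objective: alternative algorithm).


-- ===== PORT A =====
-- A's `arr` after the two table-building loops: the 4 fragments plus the concatenation of
-- every permutation of 2..4 of them (itertools.permutations = PySem.List.permutations);
-- it does not depend on the input, so it is hoisted into a helper.  Strings are handled
-- as List Char throughout (exact; '+=' on str = list append).
def arrA : List (List Char) :=
  let arr0 : List (List Char) := [['a','y','a'], ['y','e'], ['w','o','o'], ['m','a']]
  let word_perm : List (List (List Char)) :=
    ([2, 3, 4] : List Nat).foldl (fun acc i => acc ++ PySem.List.permutations arr0 i) []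
  word_perm.foldl (fun a words => a ++ [words.foldl (· ++ ·) []]) arr0

def solution (babbling : List String) : Int :=
  babbling.foldl (fun answer bab => if bab.toList ∈ arrA then answer + 1 else answer) 0

-- ===== PORT B =====
def fragsB : List (List Char) := [['a','y','a'], ['y','e'], ['w','o','o'], ['m','a']]

-- Source B's `ok(s, used)`: backtracking over unused fragments.  The Python recursion has no
-- fuel; here fuel = |s| + 1 at the top call, exact because every recursive call strips a
-- nonempty fragment off s.  `for i, f in enumerate(frags)` is ported with Nat indices
-- (all indices are ≥ 0, exact); s[len(f):] with len(f) ≥ 0 is List.drop.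
def ok : Nat → List Char → Nat → Bool
  | 0, _, _ => false
  | fuel + 1, s, used =>
    if s.isEmpty then used != 0
    else
      (List.range 4).any fun i =>
        let f := fragsB.getD i []
        !used.testBit i && PySem.Chars.startswith s f &&
          ok fuel (s.drop f.length) (used ||| (1 <<< i))

def solution_alt (babbling : List String) : Int :=
  babbling.foldl
    (fun acc bab => if ok (bab.toList.length + 1) bab.toList 0 then acc + 1 else acc) 0

-- ===== PRECONDITION & SPEC =====
def Spec_solution (babbling : List String) (out : Int) : Prop := out = solution_alt babbling
instance (babbling : List String) (out : Int) : Decidable (Spec_solution babbling out) := by unfold Spec_solution; infer_instance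

-- ===== CLAIM (what is proved, stated in full; the proofs are below) =====
def Claim_equal_solution : Prop := ∀ (babbling : List String), Dom_solution babbling → Spec_solution babbling (solution babbling)

-- ===== LEMMAS AND PROOFS =====

-- fragment i (i < 4) of B's table
def frag (i : Nat) : List Char := fragsB.getD i []

-- every word of A's table parses
theorem arrA_ok : ∀ w ∈ arrA, ok (w.length + 1) w 0 = true := by decide

-- all nonempty nodup sequences over {0,1,2,3}
def allSeqs : List (List Nat) := ([0, 1, 2, 3] : List Nat).sublists.flatMap List.permutations'

theorem allSeqs_concat_mem :
    ∀ l ∈ allSeqs, l ≠ [] → (l.map frag).flatten ∈ arrA := by decide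

theorem mem_allSeqs (l : List Nat) (hb : ∀ i ∈ l, i < 4) (hn : l.Nodup) : l ∈ allSeqs := by
  have hsub : l ⊆ [0, 1, 2, 3] := by
    intro i hi; have := hb i hi
    simp only [List.mem_cons]; omega
  obtain ⟨t, ht, hs⟩ := hn.subperm hsub
  exact List.mem_flatMap.2 ⟨t, List.mem_sublists.2 hs, List.mem_permutations'.2 ht.symm⟩

-- soundness of the parser: a successful parse is a concatenation of distinct unused fragments
theorem ok_sound : ∀ fuel (s : List Char) (used : Nat), ok fuel s used = true →
    ∃ l : List Nat, (∀ i ∈ l, i < 4 ∧ used.testBit i = false) ∧ l.Nodup ∧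
      (used = 0 → l ≠ []) ∧ s = (l.map frag).flatten := by
  intro fuel
  induction fuel with
  | zero => intro s used h; simp [ok] at h
  | succ fuel ih =>
    intro s used h
    rw [ok] at h
    by_cases hs : s.isEmpty
    · rw [if_pos hs] at h
      refine ⟨[], by simp, by simp, fun h0 => ?_, by simpa [List.isEmpty_iff] using hs⟩
      subst h0; simp at h
    · rw [if_neg hs, List.any_eq_true] at h
      obtain ⟨i, hi4, hp⟩ := h
      simp only [Bool.and_eq_true, Bool.not_eq_true'] at hp
      obtain ⟨⟨hbit, hpre⟩, hrec⟩ := hp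
      obtain ⟨t, rfl⟩ := (PySem.Chars.startswith_iff _ _).1 hpre
      obtain ⟨l', hl'b, hl'nd, _, hl'eq⟩ := ih _ _ hrec
      have hi4' : i < 4 := by simpa using hi4
      refine ⟨i :: l', ?_, ?_, fun _ => by simp, ?_⟩
      · intro j hj
        rcases List.mem_cons.1 hj with rfl | hj'
        · exact ⟨hi4', hbit⟩
        · obtain ⟨hj4, hjb⟩ := hl'b j hj'
          rw [Nat.testBit_or, Bool.or_eq_false_iff] at hjb
          exact ⟨hj4, hjb.1⟩
      · refine List.nodup_cons.2 ⟨fun hmem => ?_, hl'nd⟩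
        have := (hl'b i hmem).2
        rw [Nat.testBit_or, Nat.one_shiftLeft, Nat.testBit_two_pow] at this
        simp at this
      · rw [List.drop_left] at hl'eq
        simp only [List.map_cons, List.flatten_cons, ← hl'eq, frag]

-- per-word agreement between A's table membership and B's parser
theorem word_iff (s : List Char) : (s ∈ arrA) ↔ ok (s.length + 1) s 0 = true := by
  constructor
  · intro h; exact arrA_ok s h
  · intro h
    obtain ⟨l, hb, hnd, hne, rfl⟩ := ok_sound _ _ _ h
    exact allSeqs_concat_mem l
      (mem_allSeqs l (fun i hi => (hb i hi).1) hnd) (hne rfl)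

theorem fold_eq (babbling : List String) (acc : Int) :
    babbling.foldl (fun answer bab => if bab.toList ∈ arrA then answer + 1 else answer) acc =
    babbling.foldl
      (fun acc bab => if ok (bab.toList.length + 1) bab.toList 0 then acc + 1 else acc) acc := by
  induction babbling generalizing acc with
  | nil => rfl
  | cons b bs ih =>
    simp only [List.foldl_cons]
    rw [ih]
    congr 1
    by_cases h : b.toList ∈ arrA
    · rw [if_pos h, if_pos ((word_iff _).1 h)]
    · rw [if_neg h, if_neg (fun hc => h ((word_iff _).2 hc))]

-- ===== VERDICT (by name: the statement is the Claim_ definition above) =====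
theorem solution_spec : Claim_equal_solution := by
  intro babbling _
  unfold Spec_solution solution solution_alt
  exact fold_eq babbling 0
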